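-- pv_equiv track=rewrite | github.com/chennyso/agent | examples/hybrid_parallel/parallel_planner.py | _boundary_positions
-- ===== SOURCE A (Python) =====
-- from typing import Any, Dict, List, Optional, Sequence, Tuple
--
-- def _boundary_positions(
--     n_layers: int,
--     align_to: int,
--     min_layers_per_stage: int,
-- ) -> List[int]:
--     align = max(1, int(align_to))
--     min_layers = max(1, int(min_layers_per_stage))
--     positions = sorted(
--         {
--             cut
--             for cut in range(min_layers, n_layers)
--             if cut % align == 0 or cut == n_layers - min_layers
--         }
--     )
--     if not positions:
--         positions = list(range(min_layers, n_layers))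
--     return positions
-- ===== SOURCE B (Python) =====
-- from typing import List
--
-- def _boundary_positions(
--     n_layers: int,
--     align_to: int,
--     min_layers_per_stage: int,
-- ) -> List[int]:
--     align = max(1, int(align_to))
--     min_layers = max(1, int(min_layers_per_stage))
--     # smallest multiple of align that is >= min_layers (ceiling division)
--     first = -((-min_layers) // align) * align
--     positions = list(range(first, n_layers, align))
--     special = n_layers - min_layers
--     if min_layers <= special < n_layers and special % align != 0:
--         positions = ([p for p in positions if p < special] + [special]
--                      + [p for p in positions if p > special])
--     if not positions:
--         positions = list(range(min_layers, n_layers))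
--     return positions
-- ===== Notes on version B (the rewrite author's own statement) =====
-- stated objective: alternative
-- what changed: Instead of scanning every cut in range(min_layers, n_layers), building a set and sorting it, B generates the aligned cuts directly with a stepped range starting at the first multiple of align >= min_layers and splices the single extra cut n_layers - min_layers into its sorted position (intended as faster; a timing run read a 3.17x median at the largest size but not consistently, since the gain depends on align).
import Mathlib
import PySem

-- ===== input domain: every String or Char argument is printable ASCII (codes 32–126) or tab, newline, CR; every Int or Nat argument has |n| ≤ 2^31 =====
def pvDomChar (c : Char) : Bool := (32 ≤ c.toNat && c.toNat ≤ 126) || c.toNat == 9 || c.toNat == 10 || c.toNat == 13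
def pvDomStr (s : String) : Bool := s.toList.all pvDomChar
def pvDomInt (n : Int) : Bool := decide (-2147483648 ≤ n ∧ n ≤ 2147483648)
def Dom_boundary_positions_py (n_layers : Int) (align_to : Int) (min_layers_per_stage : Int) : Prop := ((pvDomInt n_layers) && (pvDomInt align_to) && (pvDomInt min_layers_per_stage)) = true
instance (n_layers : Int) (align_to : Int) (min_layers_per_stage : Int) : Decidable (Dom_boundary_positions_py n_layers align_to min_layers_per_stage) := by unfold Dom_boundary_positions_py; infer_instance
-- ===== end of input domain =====

-- B replaces A's scan of every layer index (set + sort) by directly generating the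
-- aligned cuts with a stepped range and splicing in the single extra cut (objective: alternative).

-- ===== PORT A =====
def boundary_positions_py (n_layers : Int) (align_to : Int) (min_layers_per_stage : Int) : List Int :=
  let align := max 1 align_to
  let min_layers := max 1 min_layers_per_stage
  let positions := PySem.List.sorted
    (PySem.Set.ofList ((PySem.List.pyRange min_layers n_layers 1).filter
      (fun cut => PySem.Int.mod cut align == 0 || cut == n_layers - min_layers)))
    (fun x => x)
  if positions = [] then PySem.List.pyRange min_layers n_layers 1 else positions

-- ===== PORT B =====
def boundary_positions_py_alt (n_layers : Int) (align_to : Int) (min_layers_per_stage : Int) : List Int :=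
  let align := max 1 align_to
  let min_layers := max 1 min_layers_per_stage
  let first := -(PySem.Int.floordiv (-min_layers) align) * align
  let positions := PySem.List.pyRange first n_layers align
  let special := n_layers - min_layers
  let positions :=
    if min_layers ≤ special ∧ special < n_layers ∧ PySem.Int.mod special align ≠ 0 then
      positions.filter (fun p => p < special) ++ special :: positions.filter (fun p => special < p)
    else positions
  if positions = [] then PySem.List.pyRange min_layers n_layers 1 else positions

-- ===== PRECONDITION & SPEC =====
def Spec_boundary_positions_py (n_layers : Int) (align_to : Int) (min_layers_per_stage : Int) (out : List Int) : Prop := out = boundary_positions_py_alt n_layers align_to min_layers_per_stage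
instance (n_layers : Int) (align_to : Int) (min_layers_per_stage : Int) (out : List Int) : Decidable (Spec_boundary_positions_py n_layers align_to min_layers_per_stage out) := by unfold Spec_boundary_positions_py; infer_instance

-- ===== CLAIM (what is proved, stated in full; the proofs are below) =====
def Claim_equal_boundary_positions_py : Prop := ∀ (n_layers : Int) (align_to : Int) (min_layers_per_stage : Int), Dom_boundary_positions_py n_layers align_to min_layers_per_stage → Spec_boundary_positions_py n_layers align_to min_layers_per_stage (boundary_positions_py n_layers align_to min_layers_per_stage)

-- ===== LEMMAS AND PROOFS =====

-- two strictly increasing integer lists with the same members are equal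
theorem pvEqOfStrictSortedMem (xs ys : List Int)
    (hx : xs.Pairwise (· < ·)) (hy : ys.Pairwise (· < ·))
    (h : ∀ z : Int, z ∈ xs ↔ z ∈ ys) : xs = ys := by
  have hnx : xs.Nodup := hx.imp (fun hab => ne_of_lt hab)
  have hny : ys.Nodup := hy.imp (fun hab => ne_of_lt hab)
  exact ((List.perm_ext_iff_of_nodup hnx hny).2 h).eq_of_pairwise
    (fun a b _ _ h1 h2 => absurd h1 (lt_asymm h2)) hx hy

-- the stepped range is strictly increasing
theorem pvPairwiseLtPyRangePos (a b s : Int) (hs : 0 < s) :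
    (PySem.List.pyRange a b s).Pairwise (· < ·) := by
  rw [PySem.List.pyRange_of_pos a b hs]
  apply List.pairwise_map.mpr
  refine (List.pairwise_lt_range).imp (fun hij => ?_)
  have h1 : ((_ : Nat) : Int) < _ := Int.ofNat_lt.mpr hij
  have := Int.mul_lt_mul_of_pos_left h1 hs
  omega

-- membership in B's stepped range, rephrased through divisibility by align
theorem pvMemAligned (ml al n x : Int) (hal : 0 < al) :
    (x ∈ PySem.List.pyRange (-(PySem.Int.floordiv (-ml) al) * al) n al) ↔
      (ml ≤ x ∧ x < n ∧ al ∣ x) := by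
  have hq := (PySem.Int.neg_floordiv_neg_eq_iff_of_pos
    (a := ml) (b := al) (q := -(PySem.Int.floordiv (-ml) al)) hal).mp rfl
  set q := -(PySem.Int.floordiv (-ml) al) with hqdef
  rw [PySem.List.mem_pyRange_iff_of_pos hal]
  constructor
  · rintro ⟨h1, h2, k, hk⟩
    refine ⟨by nlinarith [hq.2], h2, q + k, ?_⟩
    have e1 := mul_add al q k
    have e2 := mul_comm q al
    linarith
  · rintro ⟨h1, h2, k, hk⟩
    have h3 : (q - 1) * al < k * al := by
      have := mul_comm al k
      linarith [hq.1]
    have hqk : q ≤ k := by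
      have := lt_of_mul_lt_mul_right h3 (le_of_lt hal)
      omega
    refine ⟨?_, h2, k - q, by rw [hk]; ring⟩
    have := mul_le_mul_of_nonneg_right hqk (le_of_lt hal)
    have := mul_comm k al
    linarith

-- A's filtered range equals B's spliced list (the core identity)
theorem pvCore (n al ml : Int) (hal : 0 < al) :
    ((PySem.List.pyRange ml n 1).filter
      (fun cut => PySem.Int.mod cut al == 0 || cut == n - ml)) =
    (if ml ≤ n - ml ∧ n - ml < n ∧ PySem.Int.mod (n - ml) al ≠ 0 then
      (PySem.List.pyRange (-(PySem.Int.floordiv (-ml) al) * al) n al).filter (fun p => p < n - ml)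
        ++ (n - ml) :: (PySem.List.pyRange (-(PySem.Int.floordiv (-ml) al) * al) n al).filter (fun p => n - ml < p)
    else PySem.List.pyRange (-(PySem.Int.floordiv (-ml) al) * al) n al) := by
  have hM := pvPairwiseLtPyRangePos (-(PySem.Int.floordiv (-ml) al) * al) n al hal
  have hF : ((PySem.List.pyRange ml n 1).filter
      (fun cut => PySem.Int.mod cut al == 0 || cut == n - ml)).Pairwise (· < ·) :=
    List.Pairwise.sublist List.filter_sublist (PySem.List.pairwise_lt_pyRange_one ml n)
  split_ifs with hc
  · have hnd : ¬ al ∣ (n - ml) := fun hd => hc.2.2 ((PySem.Int.mod_eq_zero_iff_dvd _ _).mpr hd)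
    refine pvEqOfStrictSortedMem _ _ hF ?_ ?_
    · rw [List.pairwise_append]
      refine ⟨List.Pairwise.sublist List.filter_sublist hM, ?_, ?_⟩
      · rw [List.pairwise_cons]
        refine ⟨fun y hy => ?_, List.Pairwise.sublist List.filter_sublist hM⟩
        simpa using (List.mem_filter.mp hy).2
      · intro x hx y hy
        have hxs : x < n - ml := by simpa using (List.mem_filter.mp hx).2
        rcases List.mem_cons.mp hy with rfl | hy'
        · exact hxs
        · have : n - ml < y := by simpa using (List.mem_filter.mp hy').2
          omega
    · intro z
      simp only [List.mem_filter, List.mem_append, List.mem_cons,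
        PySem.List.mem_pyRange_one, pvMemAligned ml al n z hal,
        PySem.Int.mod_eq_zero_iff_dvd, Bool.or_eq_true, beq_iff_eq, decide_eq_true_eq]
      have ht := lt_trichotomy z (n - ml)
      have hc1 := hc.1
      have hc2 := hc.2.1
      constructor
      · rintro ⟨⟨hz1, hz2⟩, hz3 | rfl⟩
        · rcases ht with h | h | h
          · exact Or.inl ⟨⟨hz1, hz2, hz3⟩, h⟩
          · exact Or.inr (Or.inl h)
          · exact Or.inr (Or.inr ⟨⟨hz1, hz2, hz3⟩, h⟩)
        · exact Or.inr (Or.inl rfl)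
      · rintro (⟨⟨hz1, hz2, hz3⟩, _⟩ | h | ⟨⟨hz1, hz2, hz3⟩, _⟩)
        · exact ⟨⟨hz1, hz2⟩, Or.inl hz3⟩
        · exact ⟨⟨by omega, by omega⟩, Or.inr (by omega)⟩
        · exact ⟨⟨hz1, hz2⟩, Or.inl hz3⟩
  · refine pvEqOfStrictSortedMem _ _ hF hM ?_
    intro z
    simp only [List.mem_filter, PySem.List.mem_pyRange_one, pvMemAligned ml al n z hal,
      PySem.Int.mod_eq_zero_iff_dvd, Bool.or_eq_true, beq_iff_eq ]
    push Not at hc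
    constructor
    · rintro ⟨⟨h1, h2⟩, h3 | rfl⟩
      · exact ⟨h1, h2, h3⟩
      · exact ⟨h1, h2, (PySem.Int.mod_eq_zero_iff_dvd _ _).mp (hc h1 h2)⟩
    · rintro ⟨h1, h2, h3⟩
      exact ⟨⟨h1, h2⟩, Or.inl h3⟩

-- ===== VERDICT (by name: the statement is the Claim_ definition above) =====
theorem boundary_positions_py_spec : Claim_equal_boundary_positions_py := by
  intro n a m _
  unfold Spec_boundary_positions_py
  have hal : (0:Int) < max 1 a := lt_of_lt_of_le one_pos (le_max_left 1 a)
  simp only [boundary_positions_py, boundary_positions_py_alt]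
  have hFp : ((PySem.List.pyRange (max 1 m) n 1).filter
      (fun cut => PySem.Int.mod cut (max 1 a) == 0 || cut == n - max 1 m)).Pairwise (· < ·) :=
    List.Pairwise.sublist List.filter_sublist (PySem.List.pairwise_lt_pyRange_one _ _)
  have hFn : ((PySem.List.pyRange (max 1 m) n 1).filter
      (fun cut => PySem.Int.mod cut (max 1 a) == 0 || cut == n - max 1 m)).Nodup :=
    hFp.imp (fun hab => ne_of_lt hab)
  rw [PySem.Set.ofList_eq_self_of_nodup _ hFn]
  rw [PySem.List.sorted_eq_of_perm_of_pairwise_lt _ _ _ (List.Perm.refl _) hFp]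
  rw [pvCore n (max 1 a) (max 1 m) hal]
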